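-- pv_equiv track=rewrite | github.com/zhuzhouliang/WorkLogger | WorkLogger/apps/timemanager/analyzer.py | get_same_part
-- ===== SOURCE A (Python) =====
-- def get_same_part(s1, s2):
--     same_part = ''
--     for i in range(0, min(len(s1), len(s2))):
--         if s1[0:i] == s2[0:i]:
--             same_part = s1[0:i]
--         else:
--             break
--     if same_part != '':
--         same_part = same_part[0:same_part.rfind('-')]
--     return same_part
-- ===== SOURCE B (Python) =====
-- def get_same_part(s1, s2):
--     m = min(len(s1), len(s2))
--     k = 0
--     while k < m - 1 and s1[k] == s2[k]:
--         k += 1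
--     p = s1[:k]
--     return p[:p.rfind('-')] if p else p
-- ===== Notes on version B (the rewrite author's own statement) =====
-- stated objective: faster
-- what changed: Replace the loop that re-compares full prefixes s1[0:i]==s2[0:i] at every i (quadratic) by a single character-by-character scan to the first mismatch (capped at min_len-1), then the same rfind('-') trim.
import Mathlib
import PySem

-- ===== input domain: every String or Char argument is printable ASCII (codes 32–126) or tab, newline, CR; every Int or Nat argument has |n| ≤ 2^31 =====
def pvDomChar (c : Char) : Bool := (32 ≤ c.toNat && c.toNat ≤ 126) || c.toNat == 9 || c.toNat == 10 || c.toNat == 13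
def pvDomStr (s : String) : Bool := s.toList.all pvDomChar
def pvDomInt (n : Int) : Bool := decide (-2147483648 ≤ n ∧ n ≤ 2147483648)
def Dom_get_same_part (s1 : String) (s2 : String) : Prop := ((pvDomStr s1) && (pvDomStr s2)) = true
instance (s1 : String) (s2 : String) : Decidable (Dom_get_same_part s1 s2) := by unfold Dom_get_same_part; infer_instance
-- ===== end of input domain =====

-- B replaces A's loop of full prefix re-comparisons by a single scan to the first mismatch (objective: faster, measured).

-- ===== PORT A =====
-- the for-loop with its `break`: state `sp` (same_part), range list as in Python
def gspLoopA (c1 c2 : List Char) : List Int → List Char → List Char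
  | [], sp => sp
  | i :: rest, sp =>
    if PySem.List.slice c1 (some 0) (some i) = PySem.List.slice c2 (some 0) (some i) then
      gspLoopA c1 c2 rest (PySem.List.slice c1 (some 0) (some i))
    else sp

def get_same_part (s1 : String) (s2 : String) : String :=
  let c1 := s1.toList
  let c2 := s2.toList
  let sp := gspLoopA c1 c2 (PySem.List.pyRange 0 (min (c1.length : Int) (c2.length : Int)) 1) []
  String.ofList (if sp ≠ [] then PySem.List.slice sp (some 0) (some (PySem.Chars.rfind sp ['-'])) else sp)

-- ===== PORT B =====
-- the while-loop `while k < m-1 and s1[k] == s2[k]: k += 1`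
def gspScanB (c1 c2 : List Char) (mo : Nat) (k : Nat) : Nat :=
  if h : k < mo ∧ c1[k]? = c2[k]? then gspScanB c1 c2 mo (k + 1) else k
termination_by mo - k
decreasing_by omega

def get_same_part_alt (s1 : String) (s2 : String) : String :=
  let c1 := s1.toList
  let c2 := s2.toList
  let m := min c1.length c2.length
  let k := gspScanB c1 c2 (m - 1) 0
  let p := PySem.List.slice c1 none (some (k : Int))
  String.ofList (if p ≠ [] then PySem.List.slice p none (some (PySem.Chars.rfind p ['-'])) else p)

-- ===== PRECONDITION & SPEC =====
def Spec_get_same_part (s1 : String) (s2 : String) (out : String) : Prop := out = get_same_part_alt s1 s2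
instance (s1 : String) (s2 : String) (out : String) : Decidable (Spec_get_same_part s1 s2 out) := by unfold Spec_get_same_part; infer_instance

-- ===== CLAIM (what is proved, stated in full; the proofs are below) =====
def Claim_equal_get_same_part : Prop := ∀ (s1 : String) (s2 : String), Dom_get_same_part s1 s2 → Spec_get_same_part s1 s2 (get_same_part s1 s2)

-- ===== LEMMAS AND PROOFS =====

-- length of the longest common prefix (proof-side characterisation of both loops)
def lcpN : List Char → List Char → Nat
  | a :: as, b :: bs => if a = b then lcpN as bs + 1 else 0
  | _, _ => 0

lemma lcpN_drop {c1 c2 : List Char} {k : Nat} (h1 : k < c1.length) (h2 : k < c2.length) :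
    lcpN (c1.drop k) (c2.drop k) =
      if c1[k] = c2[k] then lcpN (c1.drop (k + 1)) (c2.drop (k + 1)) + 1 else 0 := by
  rw [List.drop_eq_getElem_cons h1, List.drop_eq_getElem_cons h2, lcpN]

lemma scanB_eq (c1 c2 : List Char) (mo : Nat) (hmo1 : mo ≤ c1.length) (hmo2 : mo ≤ c2.length) :
    ∀ (f k : Nat), mo - k = f → k ≤ mo →
      gspScanB c1 c2 mo k = k + min (lcpN (c1.drop k) (c2.drop k)) (mo - k) := by
  intro f
  induction f with
  | zero =>
    intro k hf hk
    rw [gspScanB]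
    have hkm : k = mo := by omega
    simp [hkm]
  | succ n ih =>
    intro k hf hk
    have hklt : k < mo := by omega
    have h1 : k < c1.length := by omega
    have h2 : k < c2.length := by omega
    rw [gspScanB, lcpN_drop h1 h2]
    by_cases hc : c1[k] = c2[k]
    · have hopt : c1[k]? = c2[k]? := by
        rw [List.getElem?_eq_getElem h1, List.getElem?_eq_getElem h2, hc]
      rw [dif_pos ⟨hklt, hopt⟩, ih (k + 1) (by omega) (by omega), if_pos hc]
      omega
    · have hopt : ¬ c1[k]? = c2[k]? := by
        rw [List.getElem?_eq_getElem h1, List.getElem?_eq_getElem h2]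
        simp [hc]
      rw [dif_neg (by tauto), if_neg hc]
      simp

lemma take_succ_eq_iff {c1 c2 : List Char} {j : Nat} (h1 : j < c1.length) (h2 : j < c2.length) :
    c1.take (j + 1) = c2.take (j + 1) ↔ (c1.take j = c2.take j ∧ c1[j] = c2[j]) := by
  rw [List.take_add_one, List.take_add_one, List.getElem?_eq_getElem h1, List.getElem?_eq_getElem h2]
  constructor
  · intro h
    have hl : (c1.take j).length = (c2.take j).length := by
      simp [List.length_take]; omega
    obtain ⟨ha, hb⟩ := List.append_inj h hl
    simp_all
  · rintro ⟨ha, hb⟩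
    simp [ha, hb]

lemma loopA_eq (c1 c2 : List Char) (m : Nat) (hm1 : m ≤ c1.length) (hm2 : m ≤ c2.length) :
    ∀ (f j : Nat) (sp : List Char), m - j = f → j ≤ m →
      gspLoopA c1 c2 (PySem.List.pyRange (j : Int) (m : Int) 1) sp =
        if j < m ∧ c1.take j = c2.take j
        then c1.take (j + min (lcpN (c1.drop j) (c2.drop j)) (m - 1 - j))
        else sp := by
  intro f
  induction f with
  | zero =>
    intro j sp hf hj
    have hjm : j = m := by omega
    rw [PySem.List.pyRange_one_eq_nil (by omega), gspLoopA]
    simp [hjm]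
  | succ n ih =>
    intro j sp hf hj
    have hjlt : j < m := by omega
    rw [PySem.List.pyRange_one_cons (by exact_mod_cast hjlt), gspLoopA]
    rw [PySem.List.slice_zero_start, PySem.List.slice_zero_start,
        PySem.List.slice_to_natCast, PySem.List.slice_to_natCast]
    by_cases hpre : c1.take j = c2.take j
    · rw [if_pos hpre]
      have hcast : ((j : Int) + 1) = (((j + 1 : Nat)) : Int) := by push_cast; ring
      rw [hcast, ih (j + 1) (c1.take j) (by omega) (by omega)]
      rcases Nat.lt_or_ge (j + 1) m with hj1 | hj1
      · have h1 : j < c1.length := by omega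
        have h2 : j < c2.length := by omega
        by_cases hc : c1[j] = c2[j]
        · have hsucc : c1.take (j + 1) = c2.take (j + 1) :=
            (take_succ_eq_iff h1 h2).mpr ⟨hpre, hc⟩
          rw [if_pos ⟨hj1, hsucc⟩, if_pos ⟨hjlt, hpre⟩, lcpN_drop h1 h2, if_pos hc]
          congr 1
          omega
        · have hsucc : ¬ c1.take (j + 1) = c2.take (j + 1) := by
            intro h; exact hc ((take_succ_eq_iff h1 h2).mp h).2
          rw [if_neg (by tauto), if_pos ⟨hjlt, hpre⟩, lcpN_drop h1 h2, if_neg hc]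
          simp
      · have hjm : j + 1 = m := by omega
        rw [if_neg (by omega), if_pos ⟨hjlt, hpre⟩]
        simp [hjm]
    · rw [if_neg hpre, if_neg (by tauto)]

lemma main_eq (s1 s2 : String) : get_same_part s1 s2 = get_same_part_alt s1 s2 := by
  unfold get_same_part get_same_part_alt
  set c1 := s1.toList with hc1
  set c2 := s2.toList with hc2
  set m := min c1.length c2.length with hm
  have hm1 : m ≤ c1.length := Nat.min_le_left _ _
  have hm2 : m ≤ c2.length := Nat.min_le_right _ _
  have hA := loopA_eq c1 c2 m hm1 hm2 m 0 [] (by omega) (by omega)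
  have hB := scanB_eq c1 c2 (m - 1) (by omega) (by omega) (m - 1) 0 rfl (Nat.zero_le _)
  have key : gspLoopA c1 c2 (PySem.List.pyRange 0 (min (c1.length : Int) (c2.length : Int)) 1) [] =
      PySem.List.slice c1 none (some ((gspScanB c1 c2 (m - 1) 0 : Nat) : Int)) := by
    have hcast : min ((c1.length : Int)) ((c2.length : Int)) = ((m : Nat) : Int) := by
      rw [hm]; push_cast; ring
    rw [PySem.List.slice_to_natCast, hB, hcast]
    have h0 : ((0 : Int)) = (((0 : Nat)) : Int) := rfl
    rw [h0, hA]
    rcases Nat.eq_zero_or_pos m with hmz | hmp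
    · simp [hmz]
    · rw [if_pos ⟨hmp, rfl⟩]
  simp only [key, PySem.List.slice_zero_start]
  rfl

theorem get_same_part_spec : Claim_equal_get_same_part := by
  intro s1 s2 _
  unfold Spec_get_same_part
  exact main_eq s1 s2
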